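-- pv_equiv track=rewrite | github.com/pjer-mili/Aoc2024 | day_8/part_2.py | generate_pairs
-- ===== SOURCE A (Python) =====
-- from collections import defaultdict
-- from itertools import combinations
--
-- def generate_pairs(
--     matrix: list[list[str]],
-- ) -> dict[str, list[tuple[tuple[int, int], tuple[int, int]]]]:
--     result = defaultdict(list)
--
--     for i, row in enumerate(matrix):
--         for j, value in enumerate(row):
--             if value != ".":
--                 result[value].append((i, j))
--
--     pairs = {key: list(combinations(values, 2)) for key, values in result.items()}
--     return pairs
-- ===== SOURCE B (Python) =====
-- def generate_pairs(matrix):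
--     # One flat scan collects the cells; per first-seen character, rescan the
--     # flat cell list for its positions and enumerate pairs with index slices.
--     cells = [((i, j), v)
--              for i, row in enumerate(matrix)
--              for j, v in enumerate(row)
--              if v != "."]
--     out = {}
--     for _, v in cells:
--         if v not in out:
--             pos = [p for p, w in cells if w == v]
--             out[v] = [(p, q) for idx, p in enumerate(pos) for q in pos[idx + 1:]]
--     return out
-- ===== Notes on version B (the rewrite author's own statement) =====
-- stated objective: alternative
-- what changed: B replaces A's defaultdict bucket-append grouping with a single flat cell scan followed by a per-first-seen-character rescan of the cell list, and replaces itertools.combinations with an enumerate+tail-slice pair comprehension.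
import Mathlib
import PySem

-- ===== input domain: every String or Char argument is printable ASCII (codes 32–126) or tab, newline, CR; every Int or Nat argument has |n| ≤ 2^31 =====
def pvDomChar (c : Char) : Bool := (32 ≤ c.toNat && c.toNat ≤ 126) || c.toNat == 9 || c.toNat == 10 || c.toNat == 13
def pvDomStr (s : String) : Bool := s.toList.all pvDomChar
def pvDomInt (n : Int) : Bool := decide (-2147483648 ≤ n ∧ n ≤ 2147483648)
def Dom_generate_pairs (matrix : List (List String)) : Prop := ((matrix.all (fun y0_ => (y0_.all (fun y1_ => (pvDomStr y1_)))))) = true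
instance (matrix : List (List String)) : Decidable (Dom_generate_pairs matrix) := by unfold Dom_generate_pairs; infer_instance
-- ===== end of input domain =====

-- B replaces A's defaultdict bucket-append grouping by a flat cell scan with a
-- per-first-seen-character rescan, and itertools.combinations by enumerate+slice
-- pair generation (objective: alternative, same result).

-- ===== PORT A =====
-- itertools.combinations(values, 2), ported by hand (exact: pairs in Python's order)
def pvComb2 {α : Type} : List α → List (α × α)
  | [] => []
  | x :: xs => xs.map (fun y => (x, y)) ++ pvComb2 xs

def generate_pairs (matrix : List (List String)) : List (String × List ((Int × Int) × (Int × Int))) :=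
  ((PySem.List.enumerate matrix).foldl (fun d irow =>
      (PySem.List.enumerate irow.2).foldl (fun d jv =>
        if jv.2 ≠ "." then d.modify jv.2 [] (fun l => l ++ [(irow.1, jv.1)]) else d) d)
      (PySem.Dict.empty : PySem.Dict String (List (Int × Int)))).items.map
    (fun kv => (kv.1, pvComb2 kv.2))

-- ===== PORT B =====
-- Source B's flat cell list: ((i, j), v) for every non-"." cell, in scan order
def pvCells (matrix : List (List String)) : List ((Int × Int) × String) :=
  (PySem.List.enumerate matrix).flatMap (fun irow =>
    (PySem.List.enumerate irow.2).filterMap (fun jv =>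
      if jv.2 ≠ "." then some ((irow.1, jv.1), jv.2) else none))

-- Source B's pair comprehension: [(p, q) for idx, p in enumerate(pos) for q in pos[idx+1:]]
def pvPairsFrom {α : Type} (pos : List α) : List (α × α) :=
  (PySem.List.enumerate pos).flatMap (fun ip =>
    (PySem.List.slice pos (some (ip.1 + 1)) none).map (fun q => (ip.2, q)))

def generate_pairs_alt (matrix : List (List String)) : List (String × List ((Int × Int) × (Int × Int))) :=
  ((pvCells matrix).foldl (fun d c =>
      if d.contains c.2 then d
      else d.insert c.2
        (pvPairsFrom (((pvCells matrix).filter (fun w => w.2 == c.2)).map (fun w => w.1))))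
      (PySem.Dict.empty : PySem.Dict String (List ((Int × Int) × (Int × Int))))).items

-- ===== PRECONDITION & SPEC =====
def Spec_generate_pairs (matrix : List (List String)) (out : List (String × List ((Int × Int) × (Int × Int)))) : Prop := out = generate_pairs_alt matrix
instance (matrix : List (List String)) (out : List (String × List ((Int × Int) × (Int × Int)))) : Decidable (Spec_generate_pairs matrix out) := by unfold Spec_generate_pairs; infer_instance

-- ===== CLAIM (what is proved, stated in full; the proofs are below) =====
def Claim_equal_generate_pairs : Prop := ∀ (matrix : List (List String)), Dom_generate_pairs matrix → Spec_generate_pairs matrix (generate_pairs matrix)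

-- ===== LEMMAS AND PROOFS =====

-- positions of character k, in scan order (the value both programs group under k)
def pvPositions (matrix : List (List String)) (k : String) : List (Int × Int) :=
  ((pvCells matrix).filter (fun w => w.2 == k)).map (fun w => w.1)

-- A's nested dict-building loop is the single fold of the modify-append step over pvCells
lemma pvA_dict_eq (matrix : List (List String)) :
    ((PySem.List.enumerate matrix).foldl (fun d irow =>
      (PySem.List.enumerate irow.2).foldl (fun d jv =>
        if jv.2 ≠ "." then d.modify jv.2 [] (fun l => l ++ [(irow.1, jv.1)]) else d) d)
      (PySem.Dict.empty : PySem.Dict String (List (Int × Int))))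
    = (pvCells matrix).foldl (fun d c => d.modify c.2 [] (fun l => l ++ [c.1])) PySem.Dict.empty := by
  unfold pvCells
  rw [List.foldl_flatMap]
  congr 1
  funext d irow
  rw [List.foldl_filterMap]
  congr 1
  funext d' jv
  by_cases h : jv.2 = "." <;> simp [h]

-- value stored by A for key k
lemma pvA_getD (matrix : List (List String)) (k : String) :
    (((pvCells matrix).foldl (fun d c => d.modify c.2 [] (fun l => l ++ [c.1]))
        (PySem.Dict.empty : PySem.Dict String (List (Int × Int)))).getD k [])
    = pvPositions matrix k := by
  have h : (pvCells matrix).foldl (fun d c => d.modify c.2 [] (fun l => l ++ [c.1]))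
      (PySem.Dict.empty : PySem.Dict String (List (Int × Int)))
      = ((pvCells matrix).map Prod.swap).foldl (fun d p => d.modify p.1 [] (fun l => l ++ [p.2]))
        PySem.Dict.empty := by
    rw [List.foldl_map]
    simp only [Prod.fst_swap, Prod.snd_swap]
  rw [h, PySem.Dict.getD_foldl_modify_append, List.filter_map, List.map_map]
  simp [pvPositions, Function.comp_def]

-- keys of B's conditional-insert fold evolve exactly as Set.update
lemma pvB_keys {κ ν : Type} [BEq κ] [LawfulBEq κ] (F : κ → ν) (l : List κ) (d : PySem.Dict κ ν) :
    (l.foldl (fun d k => if d.contains k then d else d.insert k (F k)) d).keys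
      = PySem.Set.update d.keys l := by
  induction l generalizing d with
  | nil => rfl
  | cons a l ih =>
    simp only [List.foldl_cons]
    have hupd : PySem.Set.update d.keys (a :: l) = PySem.Set.update (PySem.Set.add d.keys a) l := by
      simp [PySem.Set.update]
    by_cases hc : d.contains a = true
    · rw [if_pos hc, ih, hupd]
      have hmem : a ∈ d.keys := (PySem.Dict.contains_iff_mem_keys d a).1 hc
      have : PySem.Set.add d.keys a = d.keys := by
        simp [PySem.Set.add, PySem.Set.contains, hmem]
      rw [this]
    · rw [if_neg hc, ih, hupd]
      have hk : (d.insert a (F a)).keys = d.keys ++ [a] :=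
        PySem.Dict.keys_insert_of_not_contains d (F a) (by simpa using hc)
      have hmem : ¬ a ∈ d.keys := fun hm => hc ((PySem.Dict.contains_iff_mem_keys d a).2 hm)
      have : PySem.Set.add d.keys a = d.keys ++ [a] := by
        simp [PySem.Set.add, PySem.Set.contains, hmem]
      rw [hk, this]

-- value stored by B's conditional-insert fold (the inserted value depends on the key only)
lemma pvB_getD {κ ν : Type} [BEq κ] [LawfulBEq κ] (F : κ → ν) (l : List κ) (d : PySem.Dict κ ν)
    (k : κ) (v0 : ν) :
    (l.foldl (fun d k => if d.contains k then d else d.insert k (F k)) d).getD k v0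
      = if d.contains k then d.getD k v0 else if k ∈ l then F k else v0 := by
  induction l generalizing d with
  | nil =>
    by_cases hk : d.contains k = true
    · simp [hk]
    · simp only [List.foldl_nil, List.not_mem_nil, if_false]
      rw [if_neg (by simp_all), PySem.Dict.getD_of_not_contains d v0 (by simpa using hk)]
  | cons a l ih =>
    simp only [List.foldl_cons]
    by_cases hc : d.contains a = true
    · rw [if_pos hc, ih]
      by_cases hk : d.contains k = true
      · simp [hk]
      · have hka : ¬ k = a := fun h => hk (h ▸ hc)
        simp [hk, List.mem_cons, hka]
    · rw [if_neg hc, ih]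
      by_cases hka : k = a
      · subst hka
        simp [PySem.Dict.contains_insert_self, PySem.Dict.getD_insert_self, hc]
      · have h1 : (d.insert a (F a)).contains k = d.contains k := by
          rw [PySem.Dict.contains_insert]
          simp [hka]
        have h2 : (d.insert a (F a)).getD k v0 = d.getD k v0 :=
          PySem.Dict.getD_insert_of_ne d (F a) v0 hka
        simp [h1, h2, List.mem_cons, hka]

-- Source B's slice comprehension generates exactly itertools.combinations(pos, 2)
lemma pvPairs_aux {α : Type} (xs : List α) : ∀ (s : Nat) (ys : List α), ys.drop s = xs →
    (PySem.List.enumerate xs (s : Int)).flatMap (fun ip =>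
      (PySem.List.slice ys (some (ip.1 + 1)) none).map (fun q => (ip.2, q))) = pvComb2 xs := by
  induction xs with
  | nil => intro s ys h; simp [PySem.List.enumerate_nil, pvComb2]
  | cons x xs ih =>
    intro s ys h
    rw [PySem.List.enumerate_cons]
    simp only [List.flatMap_cons]
    have hdrop : ys.drop (s + 1) = xs := by
      rw [← List.tail_drop, h, List.tail_cons]
    have hslice : PySem.List.slice ys (some ((s : Int) + 1)) none = xs := by
      rw [PySem.List.slice_from ys (by omega : (0:Int) ≤ (s:Int) + 1)]
      have ht : ((s : Int) + 1).toNat = s + 1 := by omega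
      rw [ht, hdrop]
    have hrest := ih (s + 1) ys hdrop
    rw [Nat.cast_add, Nat.cast_one] at hrest
    rw [hslice, hrest]
    simp [pvComb2]

lemma pvPairsFrom_eq_comb2 {α : Type} (pos : List α) : pvPairsFrom pos = pvComb2 pos := by
  unfold pvPairsFrom
  exact pvPairs_aux pos 0 pos rfl

-- A's whole result in closed form
lemma pvA_eq (matrix : List (List String)) :
    generate_pairs matrix
      = (PySem.Set.ofList ((pvCells matrix).map (fun c => c.2))).map
          (fun k => (k, pvComb2 (pvPositions matrix k))) := by
  unfold generate_pairs
  rw [pvA_dict_eq]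
  set D := (pvCells matrix).foldl (fun d c => d.modify c.2 [] (fun l => l ++ [c.1]))
    (PySem.Dict.empty : PySem.Dict String (List (Int × Int))) with hD
  have hkeys : D.keys = PySem.Set.ofList ((pvCells matrix).map (fun c => c.2)) := by
    rw [hD]
    have := PySem.Dict.keys_foldl_modify_key (pvCells matrix) (fun c => c.2) []
      (fun _ c l => l ++ [c.1]) (PySem.Dict.empty : PySem.Dict String (List (Int × Int)))
    simpa [PySem.Set.ofList_eq_foldl, PySem.Set.update, PySem.Dict.keys_empty] using this
  have hnodup : D.keys.Nodup := by rw [hkeys]; exact PySem.Set.nodup_ofList _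
  rw [PySem.Dict.items_eq_map_keys D hnodup [], hkeys, List.map_map]
  refine List.map_congr_left (fun k _ => ?_)
  simp only [Function.comp]
  rw [hD, pvA_getD]

-- B's whole result in the same closed form
lemma pvB_eq (matrix : List (List String)) :
    generate_pairs_alt matrix
      = (PySem.Set.ofList ((pvCells matrix).map (fun c => c.2))).map
          (fun k => (k, pvPairsFrom (pvPositions matrix k))) := by
  unfold generate_pairs_alt
  have hfold : (pvCells matrix).foldl (fun d c =>
      if d.contains c.2 then d else d.insert c.2
        (pvPairsFrom (((pvCells matrix).filter (fun w => w.2 == c.2)).map (fun w => w.1))))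
      (PySem.Dict.empty : PySem.Dict String (List ((Int × Int) × (Int × Int))))
      = ((pvCells matrix).map (fun c => c.2)).foldl
          (fun d k => if d.contains k then d
            else d.insert k (pvPairsFrom (pvPositions matrix k))) PySem.Dict.empty := by
    rw [List.foldl_map]
    rfl
  rw [hfold]
  set out := ((pvCells matrix).map (fun c => c.2)).foldl
    (fun d k => if d.contains k then d else d.insert k (pvPairsFrom (pvPositions matrix k)))
    (PySem.Dict.empty : PySem.Dict String (List ((Int × Int) × (Int × Int)))) with hout
  have hkeys : out.keys = PySem.Set.ofList ((pvCells matrix).map (fun c => c.2)) := by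
    rw [hout, pvB_keys]
    simp [PySem.Set.ofList_eq_foldl, PySem.Set.update, PySem.Dict.keys_empty]
  have hnodup : out.keys.Nodup := by rw [hkeys]; exact PySem.Set.nodup_ofList _
  rw [PySem.Dict.items_eq_map_keys out hnodup [], hkeys]
  refine List.map_congr_left (fun k hk => ?_)
  have hmem : k ∈ (pvCells matrix).map (fun c => c.2) :=
    (PySem.Set.mem_ofList _ _).1 hk
  rw [hout, pvB_getD]
  simp [PySem.Dict.contains_empty, hmem]

-- ===== VERDICT (by name: the statement is the Claim_ definition above) =====
theorem generate_pairs_spec : Claim_equal_generate_pairs := by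
  intro matrix _
  unfold Spec_generate_pairs
  rw [pvA_eq, pvB_eq]
  refine List.map_congr_left (fun k _ => ?_)
  rw [pvPairsFrom_eq_comb2]
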